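-- pv_equiv track=rewrite | github.com/xifan-zhang/EventGPT | feasible/my_egpt_dsec_dataset/build_my_egpt_dsec_train.py | calculate_potential_clips
-- ===== SOURCE A (Python) =====
-- def calculate_potential_clips(sequence_duration_us, clip_durations_us):
--     """Calculate how many clips of each duration can be created from a sequence."""
--     potential_clips = {}
--     for duration_us in clip_durations_us:
--         if sequence_duration_us < duration_us:
--             potential_clips[duration_us] = 0
--             continue
--         step_size = duration_us // 2
--         sequence_start_us = 0
--         sequence_end_us = sequence_duration_us
--         clip_count = 0
--         clip_start = sequence_start_us
--         while clip_start + duration_us <= sequence_end_us: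
--             clip_count += 1
--             clip_start += step_size
--         potential_clips[duration_us] = max(1, clip_count)
--     return potential_clips
-- ===== SOURCE B (Python) =====
-- def calculate_potential_clips(sequence_duration_us, clip_durations_us):
--     """Calculate how many clips of each duration can be created from a sequence."""
--     potential_clips = {}
--     for duration_us in clip_durations_us:
--         if sequence_duration_us < duration_us:
--             potential_clips[duration_us] = 0
--         else:
--             potential_clips[duration_us] = (
--                 (sequence_duration_us - duration_us) // (duration_us // 2) + 1
--             )
--     return potential_clips
-- ===== Notes on version B (the rewrite author's own statement) =====
-- stated objective: faster
-- what changed: Replaced the inner while-loop stepping through the sequence in half-duration increments by the closed-form count (seq - dur) // (dur // 2) + 1 per duration; intended as faster (O(#durations) vs O(sum seq/dur)); measured: A timed out at n=16 where B returned, so no clean ratio reading.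
import Mathlib
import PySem

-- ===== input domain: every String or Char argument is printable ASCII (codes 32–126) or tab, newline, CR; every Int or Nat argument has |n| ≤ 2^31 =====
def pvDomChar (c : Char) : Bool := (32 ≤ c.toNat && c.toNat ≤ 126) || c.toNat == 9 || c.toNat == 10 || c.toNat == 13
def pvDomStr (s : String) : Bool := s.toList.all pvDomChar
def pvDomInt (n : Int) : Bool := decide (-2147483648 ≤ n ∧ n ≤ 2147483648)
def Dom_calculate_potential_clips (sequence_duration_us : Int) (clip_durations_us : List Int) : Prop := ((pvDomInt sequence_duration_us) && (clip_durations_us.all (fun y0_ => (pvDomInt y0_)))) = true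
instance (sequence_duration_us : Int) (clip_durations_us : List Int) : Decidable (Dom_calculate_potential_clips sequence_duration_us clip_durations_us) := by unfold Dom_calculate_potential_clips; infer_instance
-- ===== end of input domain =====

-- B replaces A's inner while-loop by a closed-form floor-division count per duration (intended as faster; in a timing run A timed out where B returned, so no ratio was measured).

-- ===== PORT A =====
-- the while loop: fuel makes it total (within Pre_ the fuel is never exhausted)
def pvLoopA (step dur seqEnd : Int) : Nat → Int → Int → Int
  | 0, _, clip_count => clip_count
  | fuel + 1, clip_start, clip_count =>
    if clip_start + dur ≤ seqEnd then
      pvLoopA step dur seqEnd fuel (clip_start + step) (clip_count + 1)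
    else clip_count

def calculate_potential_clips (sequence_duration_us : Int) (clip_durations_us : List Int) : List (Int × Int) :=
  (clip_durations_us.foldl (fun (potential_clips : PySem.Dict Int Int) duration_us =>
    if sequence_duration_us < duration_us then
      potential_clips.insert duration_us 0
    else
      let step_size := PySem.Int.floordiv duration_us 2
      let sequence_end_us := sequence_duration_us
      let clip_count := pvLoopA step_size duration_us sequence_end_us
        (sequence_duration_us.toNat + 1) 0 0
      potential_clips.insert duration_us (max 1 clip_count)) PySem.Dict.empty).items

-- ===== PORT B =====
def calculate_potential_clips_alt (sequence_duration_us : Int) (clip_durations_us : List Int) : List (Int × Int) :=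
  (clip_durations_us.foldl (fun (potential_clips : PySem.Dict Int Int) duration_us =>
    if sequence_duration_us < duration_us then
      potential_clips.insert duration_us 0
    else
      potential_clips.insert duration_us
        (PySem.Int.floordiv (sequence_duration_us - duration_us)
          (PySem.Int.floordiv duration_us 2) + 1)) PySem.Dict.empty).items

-- ===== PRECONDITION & SPEC =====
-- Pre_ excludes exactly the inputs on which A's while loop never terminates (Python hangs):
-- a duration ≤ 1 that fits in the sequence makes step_size = duration // 2 ≤ 0.
def Pre_calculate_potential_clips (sequence_duration_us : Int) (clip_durations_us : List Int) : Prop :=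
  ∀ d ∈ clip_durations_us, 2 ≤ d ∨ sequence_duration_us < d
instance (sequence_duration_us : Int) (clip_durations_us : List Int) : Decidable (Pre_calculate_potential_clips sequence_duration_us clip_durations_us) := by unfold Pre_calculate_potential_clips; infer_instance

def pvWitness_calculate_potential_clips : Int × List Int := (10, [2, 5, 20])

def Spec_calculate_potential_clips (sequence_duration_us : Int) (clip_durations_us : List Int) (out : List (Int × Int)) : Prop := out = calculate_potential_clips_alt sequence_duration_us clip_durations_us
instance (sequence_duration_us : Int) (clip_durations_us : List Int) (out : List (Int × Int)) : Decidable (Spec_calculate_potential_clips sequence_duration_us clip_durations_us out) := by unfold Spec_calculate_potential_clips; infer_instance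

-- ===== CLAIM (what is proved, stated in full; the proofs are below) =====
def Claim_equal_calculate_potential_clips : Prop := ∀ (sequence_duration_us : Int) (clip_durations_us : List Int), Dom_calculate_potential_clips sequence_duration_us clip_durations_us → Pre_calculate_potential_clips sequence_duration_us clip_durations_us → Spec_calculate_potential_clips sequence_duration_us clip_durations_us (calculate_potential_clips sequence_duration_us clip_durations_us)

-- ===== LEMMAS AND PROOFS =====

-- Loop characterisation: with a positive step and enough fuel, the loop counts
-- acc + (seqEnd - dur - c)/step + 1 clips when c + dur ≤ seqEnd, else acc.
theorem pvLoopA_eq (step dur seqEnd : Int) (hstep : 1 ≤ step) :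
    ∀ (fuel : Nat) (c acc : Int), seqEnd - dur - c < (fuel : Int) * step →
      pvLoopA step dur seqEnd fuel c acc =
        if c + dur ≤ seqEnd then acc + (seqEnd - dur - c) / step + 1 else acc := by
  intro fuel
  induction fuel with
  | zero =>
    intro c acc h
    simp only [Nat.cast_zero, zero_mul] at h
    simp only [pvLoopA]
    rw [if_neg (by omega)]
  | succ n ih =>
    intro c acc h
    by_cases hc : c + dur ≤ seqEnd
    · have hstep' : step ≠ 0 := by omega
      have hshift : (seqEnd - dur - (c + step)) / step = (seqEnd - dur - c) / step - 1 := by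
        have h2 := Int.add_mul_ediv_right (seqEnd - dur - c) (-1) hstep'
        have harg : seqEnd - dur - (c + step) = seqEnd - dur - c + (-1) * step := by ring
        rw [harg, h2]; ring
      have hcast : ((n + 1 : Nat) : Int) * step = (n : Int) * step + step := by push_cast; ring
      have hrec : seqEnd - dur - (c + step) < (n : Int) * step := by
        rw [hcast] at h; omega
      simp only [pvLoopA, if_pos hc]
      rw [ih (c + step) (acc + 1) hrec]
      by_cases hc2 : c + step + dur ≤ seqEnd
      · have h1 : (1 : Int) ≤ (seqEnd - dur - c) / step := by
          rw [Int.le_ediv_iff_mul_le (by omega)]; omega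
        rw [if_pos hc2, hshift]; ring
      · have h0 : (seqEnd - dur - c) / step = 0 := by
          apply Int.ediv_eq_zero_of_lt <;> omega
      
        rw [if_neg hc2, h0]; ring
    · simp only [pvLoopA, if_neg hc]

-- Per-element agreement: under Pre_'s element condition the two fold steps insert equal values.
theorem pv_step_eq (s d : Int) (hd : 2 ≤ d ∨ s < d) (hds : ¬ s < d) :
    max 1 (pvLoopA (PySem.Int.floordiv d 2) d s (s.toNat + 1) 0 0) =
      PySem.Int.floordiv (s - d) (PySem.Int.floordiv d 2) + 1 := by
  have hd2 : 2 ≤ d := by omega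
  have hstep_pos : (0 : Int) < PySem.Int.floordiv d 2 := by
    rw [PySem.Int.floordiv_eq_ediv_of_pos (by norm_num)]; omega
  set st := PySem.Int.floordiv d 2 with hst
  have hs1 : s ≤ (s.toNat : Int) := Int.self_le_toNat s
  have hfuel : s - d - 0 < ((s.toNat + 1 : Nat) : Int) * st := by
    push_cast
    nlinarith
  rw [pvLoopA_eq st d s hstep_pos (s.toNat + 1) 0 0 hfuel, if_pos (by omega)]
  rw [PySem.Int.floordiv_eq_ediv_of_pos hstep_pos]
  have heq : s - d - 0 = s - d := by ring
  rw [heq]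
  have hnn : 0 ≤ (s - d) / st := Int.ediv_nonneg (by omega) (by omega)
  generalize (s - d) / st = q at hnn ⊢
  omega

theorem pv_fold_eq (s : Int) :
    ∀ (ds : List Int), (∀ d ∈ ds, 2 ≤ d ∨ s < d) → ∀ (acc : PySem.Dict Int Int),
      ds.foldl (fun (pc : PySem.Dict Int Int) d =>
        if s < d then pc.insert d 0
        else
          let step := PySem.Int.floordiv d 2
          let se := s
          let cc := pvLoopA step d se (s.toNat + 1) 0 0
          pc.insert d (max 1 cc)) acc =
      ds.foldl (fun (pc : PySem.Dict Int Int) d =>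
        if s < d then pc.insert d 0
        else pc.insert d (PySem.Int.floordiv (s - d) (PySem.Int.floordiv d 2) + 1)) acc := by
  intro ds
  induction ds with
  | nil => intro _ _; rfl
  | cons d ds ih =>
    intro hpre acc
    simp only [List.foldl_cons]
    rw [ih (fun x hx => hpre x (List.mem_cons_of_mem d hx))]
    by_cases hds : s < d
    · rw [if_pos hds, if_pos hds]
    · rw [if_neg hds, if_neg hds,
        pv_step_eq s d (hpre d (List.mem_cons_self ..)) hds]

-- ===== VERDICT (by name: the statement is the Claim_ definition above) =====
theorem calculate_potential_clips_spec : Claim_equal_calculate_potential_clips := by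
  intro s ds _hdom hpre
  unfold Spec_calculate_potential_clips calculate_potential_clips calculate_potential_clips_alt
  rw [pv_fold_eq s ds hpre]
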